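-- pv_equiv track=rewrite | github.com/Nourimabrouk/shm-price-prediction | src/evaluation.py | _categorize_econometric_features
-- ===== SOURCE A (Python) =====
-- from typing import Dict, List, Tuple, Optional
--
-- def _categorize_econometric_features(feature_list: List[str]) -> Dict[str, List[str]]:
--     """Categorize features by econometric type for analysis.
--
--     Args:
--         feature_list: List of feature names to categorize
--
--     Returns:
--         Dictionary mapping categories to lists of feature names
--     """
--     categories = {
--         'depreciation': [],
--         'seasonality': [],
--         'interactions': [],
--         'binning': [],
--         'normalization': [],
--         'data_quality': [],
--         'basic': []
--     }
--
--     for feature in feature_list: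
--         categorized = False
--
--         # Depreciation curves
--         if any(pattern in feature for pattern in ['age_squared', 'log1p_age']):
--             categories['depreciation'].append(feature)
--             categorized = True
--
--         # Seasonality and time trends
--         elif any(pattern in feature for pattern in ['_sin', '_cos', '_trend', '2008_2009']):
--             categories['seasonality'].append(feature)
--             categorized = True
--
--         # Interaction features
--         elif any(pattern in feature for pattern in ['_interaction', '_x_']):
--             categories['interactions'].append(feature)
--             categorized = True
--
--         # Binning features
--         elif feature.endswith('_bucket'):
--             categories['binning'].append(feature)
--             categorized = True
--
--         # Group normalization (z-scores)
--         elif '_z_by_' in feature: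
--             categories['normalization'].append(feature)
--             categorized = True
--
--         # Data quality features
--         elif any(pattern in feature for pattern in ['_na', 'completeness']):
--             categories['data_quality'].append(feature)
--             categorized = True
--
--         # Everything else is basic
--         if not categorized:
--             categories['basic'].append(feature)
--
--     return categories
-- ===== SOURCE B (Python) =====
-- from typing import Dict, List
--
-- _RULES = [
--     ('depreciation', lambda f: 'age_squared' in f or 'log1p_age' in f),
--     ('seasonality', lambda f: '_sin' in f or '_cos' in f or '_trend' in f or '2008_2009' in f),
--     ('interactions', lambda f: '_interaction' in f or '_x_' in f),
--     ('binning', lambda f: f.endswith('_bucket')),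
--     ('normalization', lambda f: '_z_by_' in f),
--     ('data_quality', lambda f: '_na' in f or 'completeness' in f),
-- ]
--
--
-- def _category(feature: str) -> str:
--     for name, pred in _RULES:
--         if pred(feature):
--             return name
--     return 'basic'
--
--
-- def _categorize_econometric_features(feature_list: List[str]) -> Dict[str, List[str]]:
--     names = [name for name, _ in _RULES] + ['basic']
--     labels = [_category(f) for f in feature_list]
--     return {name: [f for f, c in zip(feature_list, labels) if c == name]
--             for name in names}
-- ===== Notes on version B (the rewrite author's own statement) =====
-- stated objective: idiomatic
-- what changed: Replaces the single mutating pass with an if/elif chain over a shared dict by a pure label function driven by an ordered rule table plus one filter pass per category building the result dict by comprehension.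
import Mathlib
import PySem

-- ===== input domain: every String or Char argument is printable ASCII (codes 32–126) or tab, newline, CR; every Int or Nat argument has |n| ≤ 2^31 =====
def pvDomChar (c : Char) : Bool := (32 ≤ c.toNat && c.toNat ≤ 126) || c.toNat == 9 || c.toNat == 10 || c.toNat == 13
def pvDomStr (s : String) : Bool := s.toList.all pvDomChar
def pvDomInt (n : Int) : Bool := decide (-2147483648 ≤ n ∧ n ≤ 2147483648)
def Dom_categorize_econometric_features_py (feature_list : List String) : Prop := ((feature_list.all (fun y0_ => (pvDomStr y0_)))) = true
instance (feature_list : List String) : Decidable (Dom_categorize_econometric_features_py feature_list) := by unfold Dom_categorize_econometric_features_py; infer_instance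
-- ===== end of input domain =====

-- B re-decomposes A's single mutating if/elif pass over a shared dict as a pure per-feature
-- label function (ordered rule table) plus one filter pass per category (idiomatic; same cost).

-- ===== PORT A =====
-- one loop iteration of A: the if/elif chain with the `categorized` flag, appending into the dict
def pvStepA (cats : PySem.Dict String (List String)) (feature : String) :
    PySem.Dict String (List String) :=
  let categorized := false
  let p :=
    if ["age_squared", "log1p_age"].any (fun pat => PySem.Str.isIn pat feature) then
      (cats.modify "depreciation" [] (· ++ [feature]), true)
    else if ["_sin", "_cos", "_trend", "2008_2009"].any (fun pat => PySem.Str.isIn pat feature) then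
      (cats.modify "seasonality" [] (· ++ [feature]), true)
    else if ["_interaction", "_x_"].any (fun pat => PySem.Str.isIn pat feature) then
      (cats.modify "interactions" [] (· ++ [feature]), true)
    else if PySem.Str.endswith feature "_bucket" then
      (cats.modify "binning" [] (· ++ [feature]), true)
    else if PySem.Str.isIn "_z_by_" feature then
      (cats.modify "normalization" [] (· ++ [feature]), true)
    else if ["_na", "completeness"].any (fun pat => PySem.Str.isIn pat feature) then
      (cats.modify "data_quality" [] (· ++ [feature]), true)
    else (cats, categorized)
  if !p.2 then p.1.modify "basic" [] (· ++ [feature]) else p.1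

def categorize_econometric_features_py (feature_list : List String) :
    List (String × List String) :=
  let categories : PySem.Dict String (List String) :=
    PySem.Dict.ofList
      [("depreciation", []), ("seasonality", []), ("interactions", []), ("binning", []),
       ("normalization", []), ("data_quality", []), ("basic", [])]
  (feature_list.foldl pvStepA categories).items

-- ===== PORT B =====
-- Source B's _category: first rule (in table order) whose predicate fires, else 'basic'
def pvCategory (feature : String) : String :=
  if PySem.Str.isIn "age_squared" feature || PySem.Str.isIn "log1p_age" feature then
    "depreciation"
  else if PySem.Str.isIn "_sin" feature || PySem.Str.isIn "_cos" feature ||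
      PySem.Str.isIn "_trend" feature || PySem.Str.isIn "2008_2009" feature then
    "seasonality"
  else if PySem.Str.isIn "_interaction" feature || PySem.Str.isIn "_x_" feature then
    "interactions"
  else if PySem.Str.endswith feature "_bucket" then "binning"
  else if PySem.Str.isIn "_z_by_" feature then "normalization"
  else if PySem.Str.isIn "_na" feature || PySem.Str.isIn "completeness" feature then
    "data_quality"
  else "basic"

def categorize_econometric_features_py_alt (feature_list : List String) :
    List (String × List String) :=
  let labels := feature_list.map pvCategory
  ["depreciation", "seasonality", "interactions", "binning", "normalization",
   "data_quality", "basic"].map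
    (fun name =>
      (name, ((feature_list.zip labels).filter (fun p => p.2 == name)).map (·.1)))

-- ===== PRECONDITION & SPEC =====
def Spec_categorize_econometric_features_py (feature_list : List String) (out : List (String × List String)) : Prop := out = categorize_econometric_features_py_alt feature_list
instance (feature_list : List String) (out : List (String × List String)) : Decidable (Spec_categorize_econometric_features_py feature_list out) := by unfold Spec_categorize_econometric_features_py; infer_instance

-- ===== CLAIM (what is proved, stated in full; the proofs are below) =====
def Claim_equal_categorize_econometric_features_py : Prop := ∀ (feature_list : List String), Dom_categorize_econometric_features_py feature_list → Spec_categorize_econometric_features_py feature_list (categorize_econometric_features_py feature_list)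

-- ===== LEMMAS AND PROOFS =====

-- characterizations of B's label function, one per branch of A's if/elif chain
theorem pv_cat1 (f : String)
    (h1 : (PySem.Str.isIn "age_squared" f || PySem.Str.isIn "log1p_age" f) = true) :
    pvCategory f = "depreciation" := by
  unfold pvCategory; simp only [Bool.or_assoc]; rw [if_pos h1]
theorem pv_cat2 (f : String)
    (h1 : ¬ (PySem.Str.isIn "age_squared" f || PySem.Str.isIn "log1p_age" f) = true)
    (h2 : (PySem.Str.isIn "_sin" f || (PySem.Str.isIn "_cos" f ||
        (PySem.Str.isIn "_trend" f || PySem.Str.isIn "2008_2009" f))) = true) :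
    pvCategory f = "seasonality" := by
  unfold pvCategory; simp only [Bool.or_assoc]; rw [if_neg h1, if_pos h2]
theorem pv_cat3 (f : String)
    (h1 : ¬ (PySem.Str.isIn "age_squared" f || PySem.Str.isIn "log1p_age" f) = true)
    (h2 : ¬ (PySem.Str.isIn "_sin" f || (PySem.Str.isIn "_cos" f ||
        (PySem.Str.isIn "_trend" f || PySem.Str.isIn "2008_2009" f))) = true)
    (h3 : (PySem.Str.isIn "_interaction" f || PySem.Str.isIn "_x_" f) = true) :
    pvCategory f = "interactions" := by
  unfold pvCategory; simp only [Bool.or_assoc]; rw [if_neg h1, if_neg h2, if_pos h3]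
theorem pv_cat4 (f : String)
    (h1 : ¬ (PySem.Str.isIn "age_squared" f || PySem.Str.isIn "log1p_age" f) = true)
    (h2 : ¬ (PySem.Str.isIn "_sin" f || (PySem.Str.isIn "_cos" f ||
        (PySem.Str.isIn "_trend" f || PySem.Str.isIn "2008_2009" f))) = true)
    (h3 : ¬ (PySem.Str.isIn "_interaction" f || PySem.Str.isIn "_x_" f) = true)
    (h4 : PySem.Str.endswith f "_bucket" = true) :
    pvCategory f = "binning" := by
  unfold pvCategory; simp only [Bool.or_assoc]; rw [if_neg h1, if_neg h2, if_neg h3, if_pos h4]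
theorem pv_cat5 (f : String)
    (h1 : ¬ (PySem.Str.isIn "age_squared" f || PySem.Str.isIn "log1p_age" f) = true)
    (h2 : ¬ (PySem.Str.isIn "_sin" f || (PySem.Str.isIn "_cos" f ||
        (PySem.Str.isIn "_trend" f || PySem.Str.isIn "2008_2009" f))) = true)
    (h3 : ¬ (PySem.Str.isIn "_interaction" f || PySem.Str.isIn "_x_" f) = true)
    (h4 : ¬ PySem.Str.endswith f "_bucket" = true)
    (h5 : PySem.Str.isIn "_z_by_" f = true) :
    pvCategory f = "normalization" := by
  unfold pvCategory; simp only [Bool.or_assoc]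
  rw [if_neg h1, if_neg h2, if_neg h3, if_neg h4, if_pos h5]
theorem pv_cat6 (f : String)
    (h1 : ¬ (PySem.Str.isIn "age_squared" f || PySem.Str.isIn "log1p_age" f) = true)
    (h2 : ¬ (PySem.Str.isIn "_sin" f || (PySem.Str.isIn "_cos" f ||
        (PySem.Str.isIn "_trend" f || PySem.Str.isIn "2008_2009" f))) = true)
    (h3 : ¬ (PySem.Str.isIn "_interaction" f || PySem.Str.isIn "_x_" f) = true)
    (h4 : ¬ PySem.Str.endswith f "_bucket" = true)
    (h5 : ¬ PySem.Str.isIn "_z_by_" f = true)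
    (h6 : (PySem.Str.isIn "_na" f || PySem.Str.isIn "completeness" f) = true) :
    pvCategory f = "data_quality" := by
  unfold pvCategory; simp only [Bool.or_assoc]
  rw [if_neg h1, if_neg h2, if_neg h3, if_neg h4, if_neg h5, if_pos h6]
theorem pv_cat7 (f : String)
    (h1 : ¬ (PySem.Str.isIn "age_squared" f || PySem.Str.isIn "log1p_age" f) = true)
    (h2 : ¬ (PySem.Str.isIn "_sin" f || (PySem.Str.isIn "_cos" f ||
        (PySem.Str.isIn "_trend" f || PySem.Str.isIn "2008_2009" f))) = true)
    (h3 : ¬ (PySem.Str.isIn "_interaction" f || PySem.Str.isIn "_x_" f) = true)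
    (h4 : ¬ PySem.Str.endswith f "_bucket" = true)
    (h5 : ¬ PySem.Str.isIn "_z_by_" f = true)
    (h6 : ¬ (PySem.Str.isIn "_na" f || PySem.Str.isIn "completeness" f) = true) :
    pvCategory f = "basic" := by
  unfold pvCategory; simp only [Bool.or_assoc]
  rw [if_neg h1, if_neg h2, if_neg h3, if_neg h4, if_neg h5, if_neg h6]

-- zip with the label list then project = filter by the label function
theorem pv_zip_filter (fl : List String) (name : String) :
    ((fl.zip (fl.map pvCategory)).filter (fun p => p.2 == name)).map (·.1)
      = fl.filter (fun f => pvCategory f == name) := by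
  induction fl with
  | nil => rfl
  | cons f fl ih =>
    simp only [List.map_cons, List.zip_cons_cons, List.filter_cons]
    by_cases h : pvCategory f == name <;> simp [h, ih]

-- one step of A's loop on a dict in the canonical 7-key shape appends f to its category
theorem pv_step (f : String) (l1 l2 l3 l4 l5 l6 l7 : List String) :
    pvStepA (PySem.Dict.mk
      [("depreciation", l1), ("seasonality", l2), ("interactions", l3), ("binning", l4),
       ("normalization", l5), ("data_quality", l6), ("basic", l7)]) f
    = PySem.Dict.mk
      [("depreciation", if pvCategory f == "depreciation" then l1 ++ [f] else l1),
       ("seasonality", if pvCategory f == "seasonality" then l2 ++ [f] else l2),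
       ("interactions", if pvCategory f == "interactions" then l3 ++ [f] else l3),
       ("binning", if pvCategory f == "binning" then l4 ++ [f] else l4),
       ("normalization", if pvCategory f == "normalization" then l5 ++ [f] else l5),
       ("data_quality", if pvCategory f == "data_quality" then l6 ++ [f] else l6),
       ("basic", if pvCategory f == "basic" then l7 ++ [f] else l7)] := by
  unfold pvStepA
  simp only [List.any_cons, List.any_nil, Bool.or_false]
  by_cases h1 : (PySem.Str.isIn "age_squared" f || PySem.Str.isIn "log1p_age" f) = true
  · rw [pv_cat1 f h1, if_pos h1]
    simp [PySem.Dict.modify, PySem.Dict.insert, PySem.Dict.getD, PySem.Dict.get?,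
      PySem.Dict.contains, List.find?]
  rw [if_neg h1]
  by_cases h2 : (PySem.Str.isIn "_sin" f || (PySem.Str.isIn "_cos" f ||
      (PySem.Str.isIn "_trend" f || PySem.Str.isIn "2008_2009" f))) = true
  · rw [pv_cat2 f h1 h2, if_pos h2]
    simp [PySem.Dict.modify, PySem.Dict.insert, PySem.Dict.getD, PySem.Dict.get?,
      PySem.Dict.contains, List.find?]
  rw [if_neg h2]
  by_cases h3 : (PySem.Str.isIn "_interaction" f || PySem.Str.isIn "_x_" f) = true
  · rw [pv_cat3 f h1 h2 h3, if_pos h3]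
    simp [PySem.Dict.modify, PySem.Dict.insert, PySem.Dict.getD, PySem.Dict.get?,
      PySem.Dict.contains, List.find?]
  rw [if_neg h3]
  by_cases h4 : PySem.Str.endswith f "_bucket" = true
  · rw [pv_cat4 f h1 h2 h3 h4, if_pos h4]
    simp [PySem.Dict.modify, PySem.Dict.insert, PySem.Dict.getD, PySem.Dict.get?,
      PySem.Dict.contains, List.find?]
  rw [if_neg h4]
  by_cases h5 : PySem.Str.isIn "_z_by_" f = true
  · rw [pv_cat5 f h1 h2 h3 h4 h5, if_pos h5]
    simp [PySem.Dict.modify, PySem.Dict.insert, PySem.Dict.getD, PySem.Dict.get?,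
      PySem.Dict.contains, List.find?]
  rw [if_neg h5]
  by_cases h6 : (PySem.Str.isIn "_na" f || PySem.Str.isIn "completeness" f) = true
  · rw [pv_cat6 f h1 h2 h3 h4 h5 h6, if_pos h6]
    simp [PySem.Dict.modify, PySem.Dict.insert, PySem.Dict.getD, PySem.Dict.get?,
      PySem.Dict.contains, List.find?]
  rw [if_neg h6, pv_cat7 f h1 h2 h3 h4 h5 h6]
  simp [PySem.Dict.modify, PySem.Dict.insert, PySem.Dict.getD, PySem.Dict.get?,
    PySem.Dict.contains, List.find?]

-- appending the new element commutes with continuing the filter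
theorem pv_comp (k f : String) (li fl : List String) :
    (if pvCategory f == k then li ++ [f] else li)
        ++ fl.filter (fun g => pvCategory g == k)
      = li ++ (f :: fl).filter (fun g => pvCategory g == k) := by
  by_cases h : pvCategory f == k <;> simp [h]

-- loop invariant: A's fold over the canonical dict accumulates the per-key filters
theorem pv_inv (fl : List String) (l1 l2 l3 l4 l5 l6 l7 : List String) :
    (fl.foldl pvStepA (PySem.Dict.mk
      [("depreciation", l1), ("seasonality", l2), ("interactions", l3), ("binning", l4),
       ("normalization", l5), ("data_quality", l6), ("basic", l7)])).items
    = [("depreciation", l1 ++ fl.filter (fun f => pvCategory f == "depreciation")),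
       ("seasonality", l2 ++ fl.filter (fun f => pvCategory f == "seasonality")),
       ("interactions", l3 ++ fl.filter (fun f => pvCategory f == "interactions")),
       ("binning", l4 ++ fl.filter (fun f => pvCategory f == "binning")),
       ("normalization", l5 ++ fl.filter (fun f => pvCategory f == "normalization")),
       ("data_quality", l6 ++ fl.filter (fun f => pvCategory f == "data_quality")),
       ("basic", l7 ++ fl.filter (fun f => pvCategory f == "basic"))] := by
  induction fl generalizing l1 l2 l3 l4 l5 l6 l7 with
  | nil => simp
  | cons f fl ih =>
    rw [List.foldl_cons, pv_step, ih]
    simp only [pv_comp]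

-- ===== VERDICT (by name: the statement is the Claim_ definition above) =====
theorem categorize_econometric_features_py_spec : Claim_equal_categorize_econometric_features_py := by
  intro fl _
  show _ = _
  unfold categorize_econometric_features_py categorize_econometric_features_py_alt
  have hofList : PySem.Dict.ofList
      ([("depreciation", []), ("seasonality", []), ("interactions", []), ("binning", []),
        ("normalization", []), ("data_quality", []), ("basic", [])] : List (String × List String))
      = PySem.Dict.mk
      [("depreciation", []), ("seasonality", []), ("interactions", []), ("binning", []),
       ("normalization", []), ("data_quality", []), ("basic", [])] := by decide
  simp only [hofList, pv_inv, List.nil_append, List.map_cons, List.map_nil, pv_zip_filter]
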